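-- pv_equiv track=rewrite | github.com/ININDII-UFU/EININDII07_PACTware_ProcessSimul | hrt/hrt_transmitter_v6.py | _parse_codes
-- ===== SOURCE A (Python) =====
-- from typing import Any, Dict, Iterable, List, Optional, Tuple, Union
--
-- _HEX_CHARS = set("0123456789ABCDEF")
--
-- def _is_hex_literal(s: str) -> bool:
--     if not s or (len(s) % 2) != 0:
--         return False
--     u = s.upper()
--     return all(ch in _HEX_CHARS for ch in u)
--
-- def _parse_codes(body_hex: str) -> List[str]:
--     body_hex = (body_hex or "").upper()
--     if len(body_hex) == 2 and _is_hex_literal(body_hex):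
--         return [body_hex]
--     if len(body_hex) < 2 or any(ch not in _HEX_CHARS for ch in body_hex):
--         return []
--     try:
--         n = int(body_hex[:2], 16)
--     except Exception:
--         n = 0
--     codes: List[str] = []
--     for i in range(2, 2 + 2 * n, 2):
--         c = body_hex[i:i + 2]
--         if len(c) == 2:
--             codes.append(c.upper())
--     return codes
-- ===== SOURCE B (Python) =====
-- _HEX_CHARS = set("0123456789ABCDEF")
--
--
-- def _is_hex_literal(s) -> bool:
--     if not s or (len(s) % 2) != 0:
--         return False
--     u = s.upper()
--     return all(ch in _HEX_CHARS for ch in u)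
--
--
-- def _parse_codes(body_hex):
--     body_hex = (body_hex or "").upper()
--     if len(body_hex) == 2 and _is_hex_literal(body_hex):
--         return [body_hex]
--     if len(body_hex) < 2 or any(ch not in _HEX_CHARS for ch in body_hex):
--         return []
--     try:
--         n = int(body_hex[:2], 16)
--     except Exception:
--         n = 0
--     # chunk the whole tail into full 2-char pairs (a trailing odd char is
--     # dropped), independently of n, then keep the first n pairs
--     it = iter(body_hex[2:])
--     pairs = [a + b for a, b in zip(it, it)]
--     return pairs[:n]
-- ===== Notes on version B (the rewrite author's own statement) =====
-- stated objective: simpler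
-- what changed: B keeps A's guards but replaces A's index-arithmetic loop over range(2, 2+2*n, 2) with bounds computed from n by one zip(it, it) pass that chunks the whole tail into full 2-char pairs (a trailing odd char drops out) and then slices off the first n pairs.
import Mathlib
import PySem

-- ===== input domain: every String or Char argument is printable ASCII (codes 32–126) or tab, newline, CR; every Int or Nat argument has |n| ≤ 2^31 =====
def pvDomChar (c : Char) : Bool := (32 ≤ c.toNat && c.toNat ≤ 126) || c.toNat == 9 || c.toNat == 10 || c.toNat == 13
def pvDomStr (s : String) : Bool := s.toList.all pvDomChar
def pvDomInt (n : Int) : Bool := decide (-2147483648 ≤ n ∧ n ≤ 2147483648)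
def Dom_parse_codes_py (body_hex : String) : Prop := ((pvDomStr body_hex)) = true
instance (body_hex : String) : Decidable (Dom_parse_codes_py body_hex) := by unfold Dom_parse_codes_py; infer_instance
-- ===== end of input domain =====

-- B keeps A's guards but replaces A's index-arithmetic loop (pair indices computed
-- from n) by one zip(it, it) pass that chunks the whole tail into full 2-char
-- pairs and then keeps the first n of them; objective: simpler.

-- ===== PORT A =====
-- _HEX_CHARS = set("0123456789ABCDEF")
def pvHEX_CHARS : PySem.Set Char := PySem.Set.ofList "0123456789ABCDEF".toList

def pv_is_hex_literal (s : List Char) : Bool :=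
  if s.isEmpty || !(s.length % 2 == 0) then false
  else (PySem.Chars.upper s).all (fun ch => PySem.Set.contains pvHEX_CHARS ch)

def parse_codes_py (body_hex : String) : List String :=
  -- (body_hex or "") is body_hex itself for every str argument
  let u : List Char := PySem.Chars.upper body_hex.toList
  if u.length == 2 && pv_is_hex_literal u then [String.ofList u]
  else if u.length < 2 || u.any (fun ch => !(PySem.Set.contains pvHEX_CHARS ch)) then []
  else
    -- try/except: int() cannot fail here (two hex chars); ValueError is modelled by getD 0
    let n : Int := (PySem.Int.ofCharsBase? (PySem.List.slice u none (some 2)) 16).getD 0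
    (PySem.List.pyRange 2 (2 + 2 * n) 2).foldl
      (fun acc i =>
        let c := PySem.List.slice u (some i) (some (i + 2))
        if c.length == 2 then acc ++ [String.ofList (PySem.Chars.upper c)] else acc) []

-- ===== PORT B =====
-- [a + b for a, b in zip(it, it)]: zip over one shared iterator pairs the tail's
-- chars two at a time and stops before a leftover odd char — ported as the
-- corresponding two-at-a-time structural recursion
def pvPairs : List Char → List String
  | [] => []
  | [_] => []
  | a :: b :: r => String.ofList [a, b] :: pvPairs r

def parse_codes_py_alt (body_hex : String) : List String :=
  let u : List Char := PySem.Chars.upper body_hex.toList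
  if u.length == 2 && pv_is_hex_literal u then [String.ofList u]
  else if u.length < 2 || u.any (fun ch => !(PySem.Set.contains pvHEX_CHARS ch)) then []
  else
    let n : Int := (PySem.Int.ofCharsBase? (PySem.List.slice u none (some 2)) 16).getD 0
    let pairs := pvPairs (PySem.List.slice u (some 2) none)
    PySem.List.slice pairs none (some n)

-- ===== PRECONDITION & SPEC =====
def Spec_parse_codes_py (body_hex : String) (out : List String) : Prop := out = parse_codes_py_alt body_hex
instance (body_hex : String) (out : List String) : Decidable (Spec_parse_codes_py body_hex out) := by unfold Spec_parse_codes_py; infer_instance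

-- ===== CLAIM (what is proved, stated in full; the proofs are below) =====
def Claim_equal_parse_codes_py : Prop := ∀ (body_hex : String), Dom_parse_codes_py body_hex → Spec_parse_codes_py body_hex (parse_codes_py body_hex)

-- ===== LEMMAS AND PROOFS =====

def pvHexList : List Char := ['0','1','2','3','4','5','6','7','8','9','A','B','C','D','E','F']

theorem pv_mem_of_contains (c : Char) (h : PySem.Set.contains pvHEX_CHARS c = true) :
    c ∈ pvHexList := by
  have he : pvHEX_CHARS = pvHexList := by decide
  rw [he] at h
  simp [PySem.Set.contains] at h
  exact h

theorem pv_upperChar_fix : ∀ c ∈ pvHexList, PySem.Chars.upperChar c = c := by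
  have h : (pvHexList.all (fun c => PySem.Chars.upperChar c == c)) = true := by decide
  intro c hc
  exact beq_iff_eq.mp (List.all_eq_true.mp h c hc)

theorem pv_parse_nonneg : ∀ c0 ∈ pvHexList, ∀ c1 ∈ pvHexList,
    0 ≤ (PySem.Int.ofCharsBase? [c0, c1] 16).getD 0 := by
  have h : (pvHexList.all (fun c0 => pvHexList.all (fun c1 =>
      decide (0 ≤ (PySem.Int.ofCharsBase? [c0, c1] 16).getD 0)))) = true := by decide
  intro c0 h0 c1 h1
  exact of_decide_eq_true (List.all_eq_true.mp (List.all_eq_true.mp h c0 h0) c1 h1)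

theorem pv_slice_from2 {α : Type} (xs : List α) :
    PySem.List.slice xs (some 2) none = xs.drop 2 := by
  simpa using PySem.List.slice_from xs (a := 2) (by norm_num)

theorem pv_slice_to2 {α : Type} (xs : List α) :
    PySem.List.slice xs none (some 2) = xs.take 2 := by
  simpa using PySem.List.slice_to xs (b := 2) (by norm_num)

theorem pvMain (t : List Char) (hfix : ∀ c ∈ t, PySem.Chars.upperChar c = c) (m : ℕ) :
    List.map (fun k => String.ofList (PySem.Chars.upper (List.take 2 (List.drop (2*k) t))))
      (List.filter (fun k => (List.take 2 (List.drop (2*k) t)).length == 2) (List.range m))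
    = List.take m (pvPairs t) := by
  induction t using pvPairs.induct generalizing m with
  | case1 =>
    simp [pvPairs]
  | case2 a =>
    have hf : List.filter (fun k => (List.take 2 (List.drop (2*k) [a])).length == 2)
        (List.range m) = [] := by
      apply List.filter_eq_nil_iff.mpr
      intro k _
      have h1 : (List.take 2 (List.drop (2*k) [a])).length ≤ 1 := by simp
      simp only [beq_iff_eq]
      omega
    rw [hf]; simp [pvPairs]
  | case3 a b r ih =>
    cases m with
    | zero => simp
    | succ m =>
      have hdr : ∀ k : ℕ, List.drop (2*(k+1)) (a :: b :: r) = List.drop (2*k) r := by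
        intro k
        rw [show 2*(k+1) = 2*k+1+1 by ring]
        rw [List.drop_succ_cons, List.drop_succ_cons]
      rw [List.range_succ_eq_map, List.filter_cons]
      have hp0 : ((List.take 2 (List.drop (2*0) (a :: b :: r))).length == 2) = true := by simp
      simp only [Nat.mul_zero, List.drop_zero] at hp0 ⊢
      rw [if_pos (by simp)]
      rw [List.map_cons]
      have hab : PySem.Chars.upper [a, b] = [a, b] := by
        have ha := hfix a (by simp)
        have hb := hfix b (by simp)
        simp [PySem.Chars.upper, ha, hb]
      rw [List.filter_map, List.map_map]
      have hfil : List.filter ((fun k => (List.take 2 (List.drop (2*k) (a :: b :: r))).length == 2) ∘ Nat.succ)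
          (List.range m) = List.filter (fun k => (List.take 2 (List.drop (2*k) r)).length == 2) (List.range m) := by
        apply List.filter_congr
        intro k _
        simp only [Function.comp_apply, ← Nat.succ_eq_add_one] at *
        rw [show Nat.succ k = k + 1 from rfl, hdr k]
      rw [hfil]
      have hmap : List.map ((fun k => String.ofList (PySem.Chars.upper (List.take 2 (List.drop (2*k) (a :: b :: r))))) ∘ Nat.succ)
          (List.filter (fun k => (List.take 2 (List.drop (2*k) r)).length == 2) (List.range m))
          = List.map (fun k => String.ofList (PySem.Chars.upper (List.take 2 (List.drop (2*k) r))))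
            (List.filter (fun k => (List.take 2 (List.drop (2*k) r)).length == 2) (List.range m)) := by
        apply List.map_congr_left
        intro k _
        simp only [Function.comp_apply]
        rw [show Nat.succ k = k + 1 from rfl, hdr k]
      rw [hmap, ih (fun c hc => hfix c (by simp [List.mem_cons]; tauto)) m]
      simp [pvPairs, hab]

-- ===== VERDICT (by name: the statement is the Claim_ definition above) =====
theorem parse_codes_py_spec : Claim_equal_parse_codes_py := by
  intro s _
  unfold Spec_parse_codes_py
  simp only [parse_codes_py, parse_codes_py_alt]
  generalize PySem.Chars.upper s.toList = u
  by_cases hc1 : (u.length == 2 && pv_is_hex_literal u) = true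
  · simp only [hc1, if_true]
  · simp only [hc1, if_false, Bool.false_eq_true]
    by_cases hc2 : (decide (u.length < 2) || u.any fun ch => !PySem.Set.contains pvHEX_CHARS ch) = true
    · simp only [hc2, if_true]
    · simp only [hc2, if_false, Bool.false_eq_true]
      -- the real branch
      have hlen : 2 ≤ u.length := by
        rcases Bool.or_eq_false_iff.mp (Bool.not_eq_true _ |>.mp hc2) with ⟨h, _⟩
        simpa using of_decide_eq_false h
      have hall : ∀ c ∈ u, PySem.Set.contains pvHEX_CHARS c = true := by
        rcases Bool.or_eq_false_iff.mp (Bool.not_eq_true _ |>.mp hc2) with ⟨_, h⟩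
        intro c hc
        have := List.any_eq_false.mp h c hc
        simpa using this
      obtain ⟨c0, c1, rest, rfl⟩ : ∃ c0 c1 rest, u = c0 :: c1 :: rest := by
        match u, hlen with
        | c0 :: c1 :: rest, _ => exact ⟨c0, c1, rest, rfl⟩
      set u := c0 :: c1 :: rest with hu
      have htake : PySem.List.slice u none (some 2) = [c0, c1] := by
        rw [pv_slice_to2]; rfl
      rw [htake]
      set n : Int := (PySem.Int.ofCharsBase? [c0, c1] 16).getD 0 with hn
      have hn0 : 0 ≤ n :=
        pv_parse_nonneg c0 (pv_mem_of_contains c0 (hall c0 (by simp [hu])))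
          c1 (pv_mem_of_contains c1 (hall c1 (by simp [hu]))) 
      -- right-hand side
      rw [pv_slice_from2, PySem.List.slice_to _ hn0]
      -- left-hand side
      rw [PySem.List.pyRange_of_pos 2 (2 + 2*n) (by norm_num : (0:ℤ) < 2)]
      have hM : (if (2:ℤ) < 2 + 2*n then ((2 + 2*n - 2 + 2 - 1)/2).toNat else 0) = n.toNat := by
        split_ifs with h <;> omega
      rw [hM, List.foldl_map]
      have hsl : ∀ k : ℕ, PySem.List.slice u (some (2 + 2*(k:ℤ))) (some (2 + 2*(k:ℤ) + 2))
          = List.take 2 (List.drop (2*k) (List.drop 2 u)) := by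
        intro k
        have h1 : (2 + 2*(k:ℤ)) = ((2 + 2*k : ℕ) : ℤ) := by push_cast; ring
        have h2 : (2 + 2*(k:ℤ) + 2) = ((2 + 2*k : ℕ) : ℤ) + ((2:ℕ) : ℤ) := by push_cast; ring
        rw [h2, h1, PySem.List.slice_natCast_add, List.drop_drop]
      simp only [hsl]
      rw [PySem.List.foldl_append_if
            (fun k => (List.take 2 (List.drop (2*k) (List.drop 2 u))).length == 2)
            (fun k => String.ofList (PySem.Chars.upper (List.take 2 (List.drop (2*k) (List.drop 2 u)))))]
      rw [List.nil_append]
      exact pvMain (List.drop 2 u)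
        (fun c hc => pv_upperChar_fix c (pv_mem_of_contains c (hall c (List.mem_of_mem_drop hc))))
        n.toNat
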